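-- pv_equiv track=rewrite | github.com/leehan32/py_study | 첫번째로 나오는 음수.py | solution
-- ===== SOURCE A (Python) =====
-- def solution(num_list):
--     answer = 0
--     negative =0
--     for i in num_list:
--         if i > 0:
--             answer += 1
--         elif i< 0:
--             negative += 1
--             break
--     if negative == 0:
--         return-1
--     return answer
-- ===== SOURCE B (Python) =====
-- def solution(num_list):
--     idx = next((k for k, x in enumerate(num_list) if x < 0), None)
--     if idx is None:
--         return -1
--     return sum(1 for x in num_list[:idx] if x > 0)
-- ===== Notes on version B (the rewrite author's own statement) =====
-- stated objective: alternative
-- what changed: Replaces A's single accumulating loop with early break by a locate-first-negative-index step followed by counting the strictly-positive elements of the prefix before that index.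
import Mathlib
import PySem

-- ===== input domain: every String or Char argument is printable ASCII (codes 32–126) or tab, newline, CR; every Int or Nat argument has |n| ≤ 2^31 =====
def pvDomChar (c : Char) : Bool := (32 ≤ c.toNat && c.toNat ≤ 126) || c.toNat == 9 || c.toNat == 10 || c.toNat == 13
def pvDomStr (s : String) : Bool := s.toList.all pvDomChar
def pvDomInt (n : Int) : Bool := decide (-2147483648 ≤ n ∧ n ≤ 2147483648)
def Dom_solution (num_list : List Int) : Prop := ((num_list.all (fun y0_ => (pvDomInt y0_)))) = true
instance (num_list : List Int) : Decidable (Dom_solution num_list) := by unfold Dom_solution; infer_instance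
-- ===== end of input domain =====

-- B locates the first negative's index, then counts positives in the prefix before it; alternative decomposition, same cost.
-- ===== PORT A =====
def solutionGo : List Int → Int → Int × Int
  | [], answer => (answer, 0)
  | i :: rest, answer =>
    if i > 0 then solutionGo rest (answer + 1)
    else if i < 0 then (answer, 1)
    else solutionGo rest answer

def solution (num_list : List Int) : Int :=
  let r := solutionGo num_list 0
  if r.2 = 0 then -1 else r.1

-- ===== PORT B =====
def solution_alt (num_list : List Int) : Int :=
  match num_list.findIdx? (fun x => decide (x < 0)) with
  | none => -1
  | some i => ((num_list.take i).countP (fun x => decide (0 < x)) : Nat)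

-- ===== PRECONDITION & SPEC =====
def Spec_solution (num_list : List Int) (out : Int) : Prop := out = solution_alt num_list
instance (num_list : List Int) (out : Int) : Decidable (Spec_solution num_list out) := by unfold Spec_solution; infer_instance

-- ===== CLAIM (what is proved, stated in full; the proofs are below) =====
def Claim_equal_solution : Prop := ∀ (num_list : List Int), Dom_solution num_list → Spec_solution num_list (solution num_list)

-- ===== LEMMAS AND PROOFS =====

-- ===== VERDICT (by name: the statement is the Claim_ definition above) =====
lemma solutionGo_key (l : List Int) (ans : Int) :
    (if (solutionGo l ans).2 = 0 then (-1 : Int) else (solutionGo l ans).1) =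
      (match l.findIdx? (fun x => decide (x < 0)) with
       | none => -1
       | some i => ans + ((l.take i).countP (fun x => decide (0 < x)) : Nat)) := by
  induction l generalizing ans with
  | nil => simp [solutionGo]
  | cons i rest ih =>
    by_cases h1 : i > 0
    · have hn : ¬ (i < 0) := by omega
      simp only [solutionGo, if_pos h1, List.findIdx?_cons, decide_eq_true_eq, if_neg hn]
      rw [ih (ans + 1)]
      cases rest.findIdx? (fun x => decide (x < 0)) with
      | none => simp
      | some j =>
        simp [List.take_succ_cons, h1]
        ring
    · by_cases h2 : i < 0
      · simp [solutionGo, if_neg h1, List.findIdx?_cons, h2]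
      · simp only [solutionGo, if_neg h1, List.findIdx?_cons, decide_eq_true_eq, if_neg h2]
        rw [ih ans]
        cases rest.findIdx? (fun x => decide (x < 0)) with
        | none => simp
        | some j =>
          have h1' : ¬ (0 < i) := h1
          simp [List.take_succ_cons, h1']

theorem solution_spec : Claim_equal_solution := by
  intro l _
  unfold Spec_solution solution solution_alt
  have := solutionGo_key l 0
  simp only at this
  rw [this]
  cases h : l.findIdx? (fun x => decide (x < 0)) <;> simp
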